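-- pv_equiv track=rewrite | github.com/hanjkim10/Algorithm | programmers/programmersExhaustiveSearch_mockTest.py | solution
-- ===== SOURCE A (Python) =====
-- def solution(answers):
--     answer = []
--     one = [1, 2, 3, 4, 5]
--     two = [2, 1, 2, 3, 2, 4, 2, 5]
--     three = [3, 3, 1, 1, 2, 2, 4, 4, 5, 5]
--
--     # 각 수포자가 맞은 수를 기록하는 배열
--     cnt = [0, 0, 0]
--
--     # 입력받은 답안을 토대로 각 수포자가 얼마나 맞았는지 탐색
--     for i in range(len(answers)):
--         # 수포자 1은 5를 주기로 반복
--         if answers[i] == one[i % 5]: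
--             cnt[0] += 1
--         # 수포자 2는 8을 주기로 반복
--         if answers[i] == two[i % 8]:
--             cnt[1] += 1
--         # 수포자 3은 10을 주기로 반복
--         if answers[i] == three[i % 10]:
--             cnt[2] += 1
--
--     # 가장 많이 맞춘 수
--     max_cnt = max(cnt)
--
--     # 가장 많이 맞춘 사람을 배열에 담기
--     for i in range(3):
--         # 가장 많이 맞춘 수와 같은 cnt 요소의 인덱스를 +1 하여 answer에 담기
--         if max_cnt == cnt[i]:
--             answer.append(i + 1)
--
--     return answer
-- ===== SOURCE B (Python) =====
-- def solution(answers):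
--     # Tally (position mod 40, value) pairs once; 40 = lcm(5, 8, 10), so each
--     # guesser's score is a fixed 40-term lookup sum over this histogram.
--     hist = {}
--     for i, a in enumerate(answers):
--         key = (i % 40, a)
--         hist[key] = hist.get(key, 0) + 1
--     patterns = ([1, 2, 3, 4, 5],
--                 [2, 1, 2, 3, 2, 4, 2, 5],
--                 [3, 3, 1, 1, 2, 2, 4, 4, 5, 5])
--     cnt = [sum(hist.get((r, p[r % len(p)]), 0) for r in range(40)) for p in patterns]
--     best = max(cnt)
--     return [i + 1 for i in range(3) if cnt[i] == best]
-- ===== Notes on version B (the rewrite author's own statement) =====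
-- stated objective: alternative
-- what changed: A compares every answer against the three repeating patterns in one interleaved loop; B never compares answers with patterns during the scan: it builds a dictionary histogram of (index mod 40, value) pairs (40 = lcm of the periods) and each guesser's score is then a fixed 40-term lookup sum over that table.
import Mathlib
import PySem

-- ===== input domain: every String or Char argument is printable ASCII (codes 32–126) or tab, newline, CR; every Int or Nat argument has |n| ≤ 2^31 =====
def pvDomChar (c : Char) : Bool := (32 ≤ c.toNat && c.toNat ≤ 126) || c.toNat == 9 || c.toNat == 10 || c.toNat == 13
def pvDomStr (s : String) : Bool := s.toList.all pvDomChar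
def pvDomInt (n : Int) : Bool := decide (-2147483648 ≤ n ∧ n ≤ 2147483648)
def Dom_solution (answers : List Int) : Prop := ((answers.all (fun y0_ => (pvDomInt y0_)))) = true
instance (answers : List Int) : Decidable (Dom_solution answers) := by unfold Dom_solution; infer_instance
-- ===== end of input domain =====

-- B replaces A's per-element comparison against the three patterns by a (index mod 40, value)
-- histogram built once, from which each score is read off as a fixed 40-term lookup sum
-- (alternative algorithm, same asymptotic cost).

-- ===== PORT A =====
-- A's single loop over i in range(len(answers)), carrying the three counters;
-- one[i % 5] etc. is List.getD: the index i % k is always < k, so in range, exact.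
def pvLoopA : List Int → Nat → Int × Int × Int → Int × Int × Int
  | [], _, c => c
  | a :: rest, i, (c0, c1, c2) =>
      pvLoopA rest (i + 1)
        ((if a = [1, 2, 3, 4, 5].getD (i % 5) 0 then c0 + 1 else c0),
         (if a = [2, 1, 2, 3, 2, 4, 2, 5].getD (i % 8) 0 then c1 + 1 else c1),
         (if a = [3, 3, 1, 1, 2, 2, 4, 4, 5, 5].getD (i % 10) 0 then c2 + 1 else c2))

def solution (answers : List Int) : List Int :=
  let (c0, c1, c2) := pvLoopA answers 0 (0, 0, 0)
  -- max(cnt) of the nonempty 3-element list, as a value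
  let maxCnt := max c0 (max c1 c2)
  -- for i in range(3): if max_cnt == cnt[i]: answer.append(i+1); i ∈ {0,1,2} so .toNat is exact
  (PySem.List.pyRange 0 3 1).foldl
    (fun acc i => if maxCnt = [c0, c1, c2].getD i.toNat 0 then acc ++ [i + 1] else acc) []

-- ===== PORT B =====
-- Source B's histogram loop: for i, a in enumerate(answers): hist[(i % 40, a)] = hist.get(.., 0) + 1
def pvHist (answers : List Int) : PySem.Dict (Int × Int) Int :=
  (PySem.List.enumerate answers).foldl
    (fun d p =>
      d.insert (PySem.Int.mod p.1 40, p.2) (d.getD (PySem.Int.mod p.1 40, p.2) 0 + 1))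
    PySem.Dict.empty

-- Source B's  sum(hist.get((r, p[r % len(p)]), 0) for r in range(40))
def pvScore (pat : List Int) (d : PySem.Dict (Int × Int) Int) : Int :=
  (PySem.List.pyRange 0 40 1).foldl
    (fun s r => s + d.getD (r, PySem.List.pyGetD pat (PySem.Int.mod r (pat.length : Int)) 0) 0) 0

def solution_alt (answers : List Int) : List Int :=
  let hist := pvHist answers
  let cnt := [pvScore [1, 2, 3, 4, 5] hist,
              pvScore [2, 1, 2, 3, 2, 4, 2, 5] hist,
              pvScore [3, 3, 1, 1, 2, 2, 4, 4, 5, 5] hist]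
  let best := max (cnt.getD 0 0) (max (cnt.getD 1 0) (cnt.getD 2 0))
  ((PySem.List.pyRange 0 3 1).filter (fun i => best == cnt.getD i.toNat 0)).map (· + 1)

-- ===== PRECONDITION & SPEC =====
def Spec_solution (answers : List Int) (out : List Int) : Prop := out = solution_alt answers
instance (answers : List Int) (out : List Int) : Decidable (Spec_solution answers out) := by unfold Spec_solution; infer_instance

-- ===== CLAIM (what is proved, stated in full; the proofs are below) =====
def Claim_equal_solution : Prop := ∀ (answers : List Int), Dom_solution answers → Spec_solution answers (solution answers)

-- ===== LEMMAS AND PROOFS =====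

-- A's modular match count for one pattern, starting at index n
def modCount (pat : List Int) : Nat → List Int → Int
  | _, [] => 0
  | n, a :: rest => (if a = pat.getD (n % pat.length) 0 then 1 else 0) + modCount pat (n + 1) rest

lemma loopA_eq (answers : List Int) : ∀ (n : Nat) (c0 c1 c2 : Int),
    pvLoopA answers n (c0, c1, c2) =
      (c0 + modCount [1, 2, 3, 4, 5] n answers,
       c1 + modCount [2, 1, 2, 3, 2, 4, 2, 5] n answers,
       c2 + modCount [3, 3, 1, 1, 2, 2, 4, 4, 5, 5] n answers) := by
  induction answers with
  | nil => intro n c0 c1 c2; simp [pvLoopA, modCount]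
  | cons a rest ih =>
    intro n c0 c1 c2
    show pvLoopA rest (n + 1) _ = _
    rw [ih]
    simp only [modCount, List.length_cons, List.length_nil]
    refine Prod.ext ?_ (Prod.ext ?_ ?_) <;> simp <;> split_ifs <;> ring

-- inserting v at key (j, a) changes a nodup lookup sum only at r = j
lemma sum_map_getD_insert (d : PySem.Dict (Int × Int) Int) (g : Int → Int) (j a v : Int) :
    ∀ (l : List Int), l.Nodup →
      (l.map (fun r => (d.insert (j, a) v).getD (r, g r) 0)).sum
        = (l.map (fun r => d.getD (r, g r) 0)).sum
          + (if j ∈ l ∧ a = g j then v - d.getD (j, a) 0 else 0) := by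
  intro l
  induction l with
  | nil => simp
  | cons r rest ih =>
    intro hnd
    have hr : r ∉ rest := (List.nodup_cons.mp hnd).1
    have hnd' := (List.nodup_cons.mp hnd).2
    simp only [List.map_cons, List.sum_cons, List.mem_cons]
    rw [ih hnd', PySem.Dict.getD_insert]
    by_cases h1 : j = r
    · subst h1
      by_cases h2 : a = g j
      · rw [if_pos (by rw [h2]), if_neg (fun hc => hr hc.1),
            if_pos ⟨Or.inl rfl, h2⟩, h2]
        ring
      · rw [if_neg (fun hc => h2 (congrArg Prod.snd hc).symm),
            if_neg (fun hc => h2 hc.2), if_neg (fun hc => h2 hc.2)]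
        ring
    · rw [if_neg (fun hc => h1 (congrArg Prod.fst hc).symm)]
      by_cases hc : j ∈ rest ∧ a = g j
      · rw [if_pos hc, if_pos ⟨Or.inr hc.1, hc.2⟩]; ring
      · rw [if_neg hc, if_neg (fun hcc => hc ⟨hcc.1.resolve_left h1, hcc.2⟩)]; ring

lemma mod40 (n : Nat) : PySem.Int.mod (n : Int) 40 = ((n % 40 : Nat) : Int) := by
  exact_mod_cast PySem.Int.mod_natCast n 40

lemma score_insert (pat : List Int) (hk : pat.length ∣ 40) (d : PySem.Dict (Int × Int) Int)
    (n : Nat) (a : Int) :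
    pvScore pat (d.insert (((n % 40 : Nat) : Int), a) (d.getD (((n % 40 : Nat) : Int), a) 0 + 1))
      = pvScore pat d + (if a = pat.getD (n % pat.length) 0 then 1 else 0) := by
  unfold pvScore
  rw [PySem.List.foldl_add, PySem.List.foldl_add,
      sum_map_getD_insert d _ _ _ _ _ (PySem.List.nodup_pyRange_one 0 40)]
  have hmem : ((n % 40 : Nat) : Int) ∈ PySem.List.pyRange 0 40 1 := by
    rw [PySem.List.mem_pyRange_one]
    constructor
    · exact_mod_cast Nat.zero_le _
    · exact_mod_cast Nat.mod_lt n (by norm_num)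
  have hg : PySem.List.pyGetD pat (PySem.Int.mod ((n % 40 : Nat) : Int) (pat.length : Int)) 0
      = pat.getD (n % pat.length) 0 := by
    rw [PySem.Int.mod_natCast, Nat.mod_mod_of_dvd n hk, PySem.List.pyGetD_natCast]
  rw [hg]
  by_cases hc : a = pat.getD (n % pat.length) 0
  · rw [if_pos ⟨hmem, hc⟩, if_pos hc]; ring
  · rw [if_neg (by rintro ⟨_, h⟩; exact hc h), if_neg hc]; ring

lemma build_score (pat : List Int) (hk : pat.length ∣ 40) (answers : List Int) :
    ∀ (n : Nat) (d : PySem.Dict (Int × Int) Int),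
      pvScore pat ((PySem.List.enumerate answers (n : Int)).foldl
          (fun d p =>
            d.insert (PySem.Int.mod p.1 40, p.2) (d.getD (PySem.Int.mod p.1 40, p.2) 0 + 1)) d)
        = pvScore pat d + modCount pat n answers := by
  induction answers with
  | nil => intro n d; simp [PySem.List.enumerate_nil, modCount]
  | cons a rest ih =>
    intro n d
    rw [PySem.List.enumerate_cons, List.foldl_cons]
    have hcast : ((n : Int) + 1) = ((n + 1 : Nat) : Int) := by push_cast; ring
    simp only [mod40 n, hcast, ih (n + 1)]
    rw [score_insert pat hk d n a]
    simp only [modCount]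
    ring

lemma score_empty (pat : List Int) : pvScore pat PySem.Dict.empty = 0 := by
  unfold pvScore
  rw [PySem.List.foldl_add]
  simp [PySem.Dict.getD_empty]

lemma hist_score (pat : List Int) (hk : pat.length ∣ 40) (answers : List Int) :
    pvScore pat (pvHist answers) = modCount pat 0 answers := by
  unfold pvHist
  have := build_score pat hk answers 0 PySem.Dict.empty
  simpa [score_empty] using this

lemma pyRange3 : PySem.List.pyRange 0 3 1 = [0, 1, 2] := by decide

-- ===== VERDICT (by name: the statement is the Claim_ definition above) =====

theorem solution_spec : Claim_equal_solution := by
  intro answers _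
  show solution answers = solution_alt answers
  unfold solution solution_alt
  simp only [loopA_eq answers 0 0 0 0,
      hist_score [1, 2, 3, 4, 5] (by norm_num) answers,
      hist_score [2, 1, 2, 3, 2, 4, 2, 5] (by norm_num) answers,
      hist_score [3, 3, 1, 1, 2, 2, 4, 4, 5, 5] (by norm_num) answers,
      zero_add, pyRange3]
  set s0 := modCount [1, 2, 3, 4, 5] 0 answers with hs0
  set s1 := modCount [2, 1, 2, 3, 2, 4, 2, 5] 0 answers with hs1
  set s2 := modCount [3, 3, 1, 1, 2, 2, 4, 4, 5, 5] 0 answers with hs2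
  simp only [List.foldl_cons, List.foldl_nil, List.filter_cons, List.filter_nil,
    List.getD, List.getElem?_cons_zero, List.getElem?_cons_succ, Int.toNat_zero,
    Int.toNat_one, Option.getD_some, beq_iff_eq]
  norm_num
  by_cases h0 : max s0 (max s1 s2) = s0 <;>
  by_cases h1 : max s0 (max s1 s2) = s1 <;>
  by_cases h2 : max s0 (max s1 s2) = s2 <;>
  simp [h0, h1, h2] <;> split_ifs <;> simp_all
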